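-- pv_equiv track=rewrite | github.com/darrencroton/ai-orchestrator | scripts/worker_jobs.py | prompt_marker
-- ===== SOURCE A (Python) =====
-- def prompt_marker(prompt: str | None) -> str | None:
--     if not prompt:
--         return None
--     for line in prompt.splitlines():
--         stripped = line.strip()
--         if stripped.startswith("TASK:") or stripped.startswith("REVIEW THIS") or stripped.startswith("RESEARCH:"):
--             return stripped[:200]
--     for line in prompt.splitlines():
--         stripped = line.strip()
--         if stripped.startswith("RETURN:") or stripped.startswith("FILES:"):
--             return stripped[:200]
--     collapsed = prompt.strip().replace("\n", " ")
--     return collapsed[:200] if collapsed else None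
-- ===== SOURCE B (Python) =====
-- def prompt_marker(prompt: str | None) -> str | None:
--     if not prompt:
--         return None
--     second = None
--     for line in prompt.splitlines():
--         stripped = line.strip()
--         if stripped.startswith("TASK:") or stripped.startswith("REVIEW THIS") or stripped.startswith("RESEARCH:"):
--             return stripped[:200]
--         if second is None and (stripped.startswith("RETURN:") or stripped.startswith("FILES:")):
--             second = stripped
--     if second is not None:
--         return second[:200]
--     collapsed = prompt.strip().replace("\n", " ")
--     return collapsed[:200] if collapsed else None
-- ===== Notes on version B (the rewrite author's own statement) =====
-- stated objective: alternative
-- what changed: Single pass over the lines recording the first second-tier marker line instead of A's two separate passes over splitlines.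
import Mathlib
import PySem

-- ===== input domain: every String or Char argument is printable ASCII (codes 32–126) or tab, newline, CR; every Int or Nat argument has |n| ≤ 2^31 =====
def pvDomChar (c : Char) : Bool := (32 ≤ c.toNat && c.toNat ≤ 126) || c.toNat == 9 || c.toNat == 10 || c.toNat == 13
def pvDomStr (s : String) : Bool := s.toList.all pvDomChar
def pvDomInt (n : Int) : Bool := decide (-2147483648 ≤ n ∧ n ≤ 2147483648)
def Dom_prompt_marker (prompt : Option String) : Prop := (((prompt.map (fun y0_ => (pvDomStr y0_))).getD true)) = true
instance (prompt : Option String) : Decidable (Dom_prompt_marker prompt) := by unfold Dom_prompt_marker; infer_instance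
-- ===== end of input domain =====

-- B is a single pass over the lines recording the first second-tier marker, instead of A's two passes; return value only, no side effects.

-- ===== PORT A =====
-- shared marker predicates / truncation (identical text in both Pythons)
def pvTrunc (s : String) : String := PySem.Str.slice s none (some 200)
def pvHigh (s : String) : Bool :=
  PySem.Str.startswith s "TASK:" || PySem.Str.startswith s "REVIEW THIS" || PySem.Str.startswith s "RESEARCH:"
def pvSecond (s : String) : Bool :=
  PySem.Str.startswith s "RETURN:" || PySem.Str.startswith s "FILES:"
def pvFallback (p : String) : Option String :=
  let collapsed := PySem.Str.replace (PySem.Str.strip p) "\n" " "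
  if collapsed = "" then none else some (pvTrunc collapsed)

-- A's first for-loop (early return on a high-priority marker)
def aLoop1 : List String → Option String
  | [] => none
  | l :: rest =>
    let stripped := PySem.Str.strip l
    if pvHigh stripped then some (pvTrunc stripped) else aLoop1 rest

-- A's second for-loop (early return on a second-tier marker)
def aLoop2 : List String → Option String
  | [] => none
  | l :: rest =>
    let stripped := PySem.Str.strip l
    if pvSecond stripped then some (pvTrunc stripped) else aLoop2 rest

def prompt_marker (prompt : Option String) : Option String :=
  match prompt with
  | none => none
  | some p =>
    if p = "" then none
    else
      match aLoop1 (PySem.Str.splitlines p) with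
      | some r => some r
      | none =>
        match aLoop2 (PySem.Str.splitlines p) with
        | some r => some r
        | none => pvFallback p

-- ===== PORT B =====
-- single pass: early return on a high-priority marker, record the first second-tier line in `second`
def bLoop (p : String) : List String → Option String → Option String
  | [], second =>
    match second with
    | some s => some (pvTrunc s)
    | none => pvFallback p
  | l :: rest, second =>
    let stripped := PySem.Str.strip l
    if pvHigh stripped then some (pvTrunc stripped)
    else bLoop p rest (if second.isNone && pvSecond stripped then some stripped else second)

def prompt_marker_alt (prompt : Option String) : Option String :=
  match prompt with
  | none => none
  | some p => if p = "" then none else bLoop p (PySem.Str.splitlines p) none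

-- ===== PRECONDITION & SPEC =====
def Spec_prompt_marker (prompt : Option String) (out : Option String) : Prop := out = prompt_marker_alt prompt
instance (prompt : Option String) (out : Option String) : Decidable (Spec_prompt_marker prompt out) := by unfold Spec_prompt_marker; infer_instance

-- ===== CLAIM (what is proved, stated in full; the proofs are below) =====
def Claim_equal_prompt_marker : Prop := ∀ (prompt : Option String), Dom_prompt_marker prompt → Spec_prompt_marker prompt (prompt_marker prompt)

-- ===== LEMMAS AND PROOFS =====

-- invariant of B's single pass: it equals A's first pass, then the pending `second`, then A's second pass, then the fallback
lemma bLoop_eq (p : String) (lines : List String) : ∀ second : Option String,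
    bLoop p lines second =
      match aLoop1 lines with
      | some r => some r
      | none =>
        match second with
        | some s => some (pvTrunc s)
        | none =>
          match aLoop2 lines with
          | some r => some r
          | none => pvFallback p := by
  induction lines with
  | nil => intro second; cases second <;> rfl
  | cons l rest ih =>
    intro second
    simp only [bLoop, aLoop1, aLoop2]
    by_cases h : pvHigh (PySem.Str.strip l) = true
    · simp [h]
    · simp only [h, Bool.false_eq_true, if_false, ih]
      cases second with
      | some s => simp
      | none =>
        by_cases h2 : pvSecond (PySem.Str.strip l) = true <;> simp [h2]

-- ===== VERDICT (by name: the statement is the Claim_ definition above) =====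
theorem prompt_marker_spec : Claim_equal_prompt_marker := by
  intro prompt _
  unfold Spec_prompt_marker prompt_marker prompt_marker_alt
  cases prompt with
  | none => rfl
  | some p =>
    by_cases hp : p = ""
    · simp [hp]
    · simp only [hp, if_false, bLoop_eq]
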